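-- pv_equiv track=rewrite | github.com/gourav2001k/Algorithms-CP | LC-Daily/LC3480.py | maxSubarrays
-- ===== SOURCE A (Python) =====
-- from typing import List
--
-- def maxSubarrays(n: int, conflictingPairs: List[List[int]]) -> int:
--     right = [[] for i in range(n+1)]
--     for a, b in conflictingPairs:
--         right[max(a, b)].append(min(a, b))
--
--     out = 0
--     l1, l2 = 0, 0
--     diff = [0 for i in range(n+1)]
--     for r in range(1, n+1):
--         for l in right[r]:
--             if l > l1:
--                 l1, l2 = l, l1
--             elif l > l2:
--                 l1, l2 = l1, l
--         out += r-l1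
--         diff[l1] += l1-l2
--     return out+max(diff)
-- ===== SOURCE B (Python) =====
-- from typing import List
--
-- def maxSubarrays(n: int, conflictingPairs: List[List[int]]) -> int:
--     # For each r, recompute the two largest "min endpoints" among pairs whose
--     # max endpoint is <= r by sorting (instead of A's bucket array + incremental
--     # top-two state).  gain[v] accumulates what removing the pair bounding at v
--     # would win; the answer adds the best gain.
--     gain = [0] * (n + 1)
--     out = 0
--     for r in range(1, n + 1):
--         ms = sorted([0, 0] + [min(a, b) for a, b in conflictingPairs if max(a, b) <= r],
--                     reverse=True)
--         b1, b2 = ms[0], ms[1]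
--         out += r - b1
--         gain[b1] += b1 - b2
--     return out + max(gain)
-- ===== Notes on version B (the rewrite author's own statement) =====
-- stated objective: alternative
-- what changed: A builds a bucket array right[] and carries an incremental top-two (l1,l2) plus a diff array across the sweep; B keeps no incremental bound state at all: for each r it recomputes the two largest min-endpoints among pairs with max endpoint <= r by sorting a freshly filtered list, trading A's O(n+m) incremental sweep for a stateless O(n*m log m) recomputation.
import Mathlib
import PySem

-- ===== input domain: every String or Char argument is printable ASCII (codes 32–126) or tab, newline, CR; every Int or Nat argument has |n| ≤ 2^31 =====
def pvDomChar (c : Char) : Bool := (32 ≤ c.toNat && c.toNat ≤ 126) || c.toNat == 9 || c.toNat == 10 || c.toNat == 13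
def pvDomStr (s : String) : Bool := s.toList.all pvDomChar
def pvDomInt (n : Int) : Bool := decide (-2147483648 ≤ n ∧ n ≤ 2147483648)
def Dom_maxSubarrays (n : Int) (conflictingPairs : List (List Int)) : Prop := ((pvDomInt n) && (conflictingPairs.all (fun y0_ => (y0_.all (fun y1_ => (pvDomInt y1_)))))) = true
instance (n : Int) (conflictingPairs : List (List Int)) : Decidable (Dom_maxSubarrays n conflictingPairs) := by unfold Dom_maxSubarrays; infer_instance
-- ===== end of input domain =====

-- B replaces A's bucket array and incremental top-two state by a stateless per-r
-- recomputation (filter + sort); equal on the documented domain (n ≥ 0, pairs [a,b] with 1 ≤ a,b ≤ n).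

-- ===== PORT A =====
-- right[max(a,b)].append(min(a,b)); index is in range under Pre_ (the match fallback
-- and pyGetD/pySetD defaults are never reached inside Pre_; outside, Python raises).
def pvBucketStep (right : List (List Int)) (p : List Int) : List (List Int) :=
  match p with
  | [a, b] =>
      PySem.List.pySetD right (max a b)
        ((PySem.List.pyGetD right (max a b) []) ++ [min a b])
  | _ => right

-- the inner 'for l in right[r]' update of (l1, l2)
def pvTop2Step (t : Int × Int) (l : Int) : Int × Int :=
  if l > t.1 then (l, t.1) else if l > t.2 then (t.1, l) else t

-- one iteration of 'for r in range(1, n+1)' over state (out, l1, l2, diff)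
def pvAStep (right : List (List Int)) (s : Int × Int × Int × List Int) (r : Int) :
    Int × Int × Int × List Int :=
  let t := (PySem.List.pyGetD right r []).foldl pvTop2Step (s.2.1, s.2.2.1)
  (s.1 + (r - t.1), t.1, t.2,
    PySem.List.pySetD s.2.2.2 t.1 (PySem.List.pyGetD s.2.2.2 t.1 0 + (t.1 - t.2)))

def maxSubarrays (n : Int) (conflictingPairs : List (List Int)) : Int :=
  let right := conflictingPairs.foldl pvBucketStep (List.replicate (n + 1).toNat [])
  let st := (PySem.List.pyRange 1 (n + 1) 1).foldl (pvAStep right)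
      (0, 0, 0, List.replicate (n + 1).toNat (0 : Int))
  st.1 + ((PySem.List.max? st.2.2.2 (fun x => x)).getD 0)

-- ===== PORT B =====
-- [min(a, b) for a, b in conflictingPairs if max(a, b) <= r]
def pvAltMins (conflictingPairs : List (List Int)) (r : Int) : List Int :=
  conflictingPairs.filterMap (fun p =>
    match p with
    | [a, b] => if max a b ≤ r then some (min a b) else none
    | _ => none)

-- one iteration of B's 'for r in range(1, n+1)' over state (out, gain)
def pvBStep (conflictingPairs : List (List Int)) (s : Int × List Int) (r : Int) :
    Int × List Int :=
  let ms := PySem.List.sorted ([0, 0] ++ pvAltMins conflictingPairs r) (fun x => x) true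
  let b1 := PySem.List.pyGetD ms 0 0
  let b2 := PySem.List.pyGetD ms 1 0
  (s.1 + (r - b1), PySem.List.pySetD s.2 b1 (PySem.List.pyGetD s.2 b1 0 + (b1 - b2)))

def maxSubarrays_alt (n : Int) (conflictingPairs : List (List Int)) : Int :=
  let st := (PySem.List.pyRange 1 (n + 1) 1).foldl (pvBStep conflictingPairs)
      (0, List.replicate (n + 1).toNat (0 : Int))
  st.1 + ((PySem.List.max? st.2 (fun x => x)).getD 0)

-- ===== PRECONDITION & SPEC =====
-- max endpoint of a two-element pair (helper for Pre_ and the proofs)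
def pvPMax (p : List Int) : Int := match p with | [a, b] => max a b | _ => 0

-- Pre_ admits exactly the inputs on which A returns: n ≥ 0 and every pair a
-- two-element list whose max endpoint is a valid (possibly negative) index into
-- right, i.e. -(n+1) ≤ max(a,b) ≤ n; elsewhere A raises ValueError/IndexError.
def Pre_maxSubarrays (n : Int) (conflictingPairs : List (List Int)) : Prop :=
  0 ≤ n ∧ ∀ p ∈ conflictingPairs, p.length = 2 ∧ -(n + 1) ≤ pvPMax p ∧ pvPMax p ≤ n

instance (n : Int) (conflictingPairs : List (List Int)) : Decidable (Pre_maxSubarrays n conflictingPairs) := by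
  unfold Pre_maxSubarrays; infer_instance

def pvWitness_maxSubarrays : Int × List (List Int) := (4, [[2, 3], [1, 4], [2, 2]])

def Spec_maxSubarrays (n : Int) (conflictingPairs : List (List Int)) (out : Int) : Prop := out = maxSubarrays_alt n conflictingPairs
instance (n : Int) (conflictingPairs : List (List Int)) (out : Int) : Decidable (Spec_maxSubarrays n conflictingPairs out) := by unfold Spec_maxSubarrays; infer_instance

-- ===== CLAIM (what is proved, stated in full; the proofs are below) =====
def Claim_equal_maxSubarrays : Prop := ∀ (n : Int) (conflictingPairs : List (List Int)), Dom_maxSubarrays n conflictingPairs → Pre_maxSubarrays n conflictingPairs → Spec_maxSubarrays n conflictingPairs (maxSubarrays n conflictingPairs)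

-- ===== LEMMAS AND PROOFS =====

-- min endpoint of a two-element pair
def pvPMin (p : List Int) : Int := match p with | [a, b] => min a b | _ => 0

-- bucket index the pair actually lands on (negative max endpoints wrap around)
def pvIdx (n : Int) (p : List Int) : Int :=
  if 0 ≤ pvPMax p then pvPMax p else pvPMax p + (n + 1)

-- mins of the pairs with max endpoint ≤ r, in input order
def pvMins (ps : List (List Int)) (r : Int) : List Int :=
  (ps.filter (fun p => decide (pvPMax p ≤ r))).map pvPMin

-- running top-two of a list, from (0, 0)
def pvF (ls : List Int) : Int × Int := ls.foldl pvTop2Step (0, 0)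

theorem pvTop2Step_rcomm : ∀ t a b, pvTop2Step (pvTop2Step t a) b = pvTop2Step (pvTop2Step t b) a := by
  intro t a b
  obtain ⟨p, q⟩ := t
  simp only [pvTop2Step]
  split_ifs <;> simp_all <;> omega

theorem pvF_perm {l1 l2 : List Int} (h : l1.Perm l2) : pvF l1 = pvF l2 := by
  letI : RightCommutative pvTop2Step := ⟨pvTop2Step_rcomm⟩
  exact h.foldl_eq (0, 0)

theorem pvF_noop (p q : Int) (t : List Int) (hpq : q ≤ p) (h : ∀ l ∈ t, l ≤ q) :
    t.foldl pvTop2Step (p, q) = (p, q) := by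
  induction t with
  | nil => rfl
  | cons x xs ih =>
      have hx := h x (by simp)
      simp only [List.foldl_cons, pvTop2Step]
      rw [if_neg (by omega), if_neg (by omega)]
      exact ih (fun l hl => h l (by simp [hl]))

theorem pvF_desc (x0 x1 : Int) (t : List Int) (h : (x0 :: x1 :: t).Pairwise (fun a b => b ≤ a))
    (h1 : 0 ≤ x1) : pvF (x0 :: x1 :: t) = (x0, x1) := by
  have h01 : x1 ≤ x0 := (List.pairwise_cons.mp h).1 x1 (by simp)
  have ht : ∀ l ∈ t, l ≤ x1 :=
    fun l hl => (List.pairwise_cons.mp (List.pairwise_cons.mp h).2).1 l hl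
  have hstep : pvTop2Step (pvTop2Step (0, 0) x0) x1 = (x0, x1) := by
    simp only [pvTop2Step]
    split_ifs <;> simp_all <;> omega
  show (t.foldl pvTop2Step (pvTop2Step (pvTop2Step (0,0) x0) x1)) = (x0, x1)
  rw [hstep]
  exact pvF_noop x0 x1 t h01 ht

theorem pvAltMins_cons (a b r : Int) (t : List (List Int)) :
    pvAltMins ([a, b] :: t) r =
      if max a b ≤ r then min a b :: pvAltMins t r else pvAltMins t r := by
  simp only [pvAltMins, List.filterMap_cons]
  by_cases hc : max a b ≤ r
  · rw [if_pos hc, if_pos hc]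
  · rw [if_neg hc, if_neg hc]

theorem pvMins_cons_pair (a b r : Int) (t : List (List Int)) :
    pvMins ([a, b] :: t) r =
      if max a b ≤ r then min a b :: pvMins t r else pvMins t r := by
  by_cases hc : max a b ≤ r <;> simp [pvMins, pvPMax, pvPMin, List.filter_cons, hc]

theorem pvAltMins_eq (ps : List (List Int)) (r : Int)
    (hps : ∀ p ∈ ps, p.length = 2) : pvAltMins ps r = pvMins ps r := by
  induction ps with
  | nil => rfl
  | cons p t ih =>
      obtain ⟨a, b, rfl⟩ : ∃ a b, p = [a, b] := by
        have := hps p (by simp)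
        match p, this with
        | [a, b], _ => exact ⟨a, b, rfl⟩
      have ih' := ih (fun q hq => hps q (by simp [hq]))
      rw [pvAltMins_cons, pvMins_cons_pair, ih']
theorem pvB_top2 (ps : List (List Int)) (r : Int)
    (hps : ∀ p ∈ ps, p.length = 2) :
    (PySem.List.pyGetD (PySem.List.sorted ([0, 0] ++ pvAltMins ps r) (fun x => x) true) 0 0,
     PySem.List.pyGetD (PySem.List.sorted ([0, 0] ++ pvAltMins ps r) (fun x => x) true) 1 0) =
    pvF (pvMins ps r) := by
  rw [pvAltMins_eq ps r hps]
  have hperm : (PySem.List.sorted ([0, 0] ++ pvMins ps r) (fun x => x) true).Perm (0 :: 0 :: pvMins ps r) := PySem.List.sorted_perm _ _ _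
  have hpw : (PySem.List.sorted ([0, 0] ++ pvMins ps r) (fun x => x) true).Pairwise (fun a b => b ≤ a) := by
    have := PySem.List.sorted_pairwise_rev ([0, 0] ++ pvMins ps r) (fun x => x)
    simpa using this
  have hlen : 2 ≤ (PySem.List.sorted ([0, 0] ++ pvMins ps r) (fun x => x) true).length := by
    have := hperm.length_eq
    simp only [List.length_cons] at this
    omega
  obtain ⟨m0, m1, t, hms⟩ : ∃ m0 m1 t, PySem.List.sorted ([0, 0] ++ pvMins ps r) (fun x => x) true = m0 :: m1 :: t := by
    match hsort : PySem.List.sorted ([0, 0] ++ pvMins ps r) (fun x => x) true, hlen with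
    | m0 :: m1 :: t, _ => exact ⟨m0, m1, t, rfl⟩
  rw [hms] at hperm hpw ⊢
  have hm1 : 0 ≤ m1 := by
    by_contra hneg
    have hneg' : m1 < 0 := by omega
    have hcnt : (m0 :: m1 :: t).count 0 = (0 :: 0 :: pvMins ps r).count 0 := hperm.count_eq 0
    have ht0 : (m1 :: t).count 0 = 0 := by
      apply List.count_eq_zero.mpr
      intro hmem
      rcases List.mem_cons.mp hmem with h | h
      · omega
      · have := (List.pairwise_cons.mp (List.pairwise_cons.mp hpw).2).1 0 h
        omega
    by_cases hm0 : m0 = 0 <;>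
      simp [List.count_cons, hm0, ht0, List.count_eq_zero.mp ht0] at hcnt
  have hF : pvF (0 :: 0 :: pvMins ps r) = (m0, m1) := by
    rw [pvF_perm hperm.symm]
    exact pvF_desc m0 m1 t hpw hm1
  have hF2 : pvF (0 :: 0 :: pvMins ps r) = pvF (pvMins ps r) := rfl
  have hg0 : PySem.List.pyGetD (m0 :: m1 :: t) (0 : Int) 0 = m0 := by
    simp [PySem.List.pyGetD, PySem.List.pyGet?, PySem.List.pyIdx?,
      show ((0:Int) ≤ (t.length:Int) + 1) from by omega]
  have hg1 : PySem.List.pyGetD (m0 :: m1 :: t) (1 : Int) 0 = m1 := by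
    simp [PySem.List.pyGetD, PySem.List.pyGet?, PySem.List.pyIdx?,
      show ((1:Int) ≤ (t.length:Int) + 1) from by omega,
      show ((0:Int) ≤ (t.length:Int) + 1) from by omega]
  rw [hg0, hg1, ← hF2, hF]

theorem pvSetD_wrap {α : Type} (acc : List α) (j : Int) (v : α) (m : Nat)
    (hlen : acc.length = m) (h1 : -(m : Int) ≤ j) (h2 : j < (m : Int)) :
    PySem.List.pySetD acc j v =
      acc.set (if 0 ≤ j then j.toNat else (j + m).toNat) v := by
  unfold PySem.List.pySetD PySem.List.pySet? PySem.List.pyIdx?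
  rw [hlen]
  by_cases h : 0 ≤ j
  · rw [if_pos h, if_pos h2, if_pos h]
    rfl
  · rw [if_neg h, if_pos h1, if_neg h]
    have : m - (-j).toNat = (j + m).toNat := by omega
    rw [this]
    rfl

theorem pvGetD_wrap {α : Type} (acc : List α) (j : Int) (d : α) (m : Nat)
    (hlen : acc.length = m) (h1 : -(m : Int) ≤ j) (h2 : j < (m : Int)) :
    PySem.List.pyGetD acc j d =
      acc.getD (if 0 ≤ j then j.toNat else (j + m).toNat) d := by
  unfold PySem.List.pyGetD PySem.List.pyGet? PySem.List.pyIdx?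
  rw [hlen]
  by_cases h : 0 ≤ j
  · rw [if_pos h, if_pos h2, if_pos h]
    simp [List.getD]
  · rw [if_neg h, if_pos h1, if_neg h]
    have : m - (-j).toNat = (j + m).toNat := by omega
    rw [this]
    simp [List.getD]

theorem pvBucket_go (n r : Int) (ps : List (List Int)) (acc : List (List Int))
    (hlen : acc.length = (n + 1).toNat) (hn : 0 ≤ n) (h0 : 0 ≤ r) (hr : r ≤ n)
    (hps : ∀ p ∈ ps, p.length = 2 ∧ -(n + 1) ≤ pvPMax p ∧ pvPMax p ≤ n) :
    PySem.List.pyGetD (ps.foldl pvBucketStep acc) r [] =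
      PySem.List.pyGetD acc r [] ++ (ps.filter (fun p => decide (pvIdx n p = r))).map pvPMin := by
  induction ps generalizing acc with
  | nil => simp
  | cons p t ih =>
      obtain ⟨a, b, rfl⟩ : ∃ a b, p = [a, b] := by
        have := (hps p (by simp)).1
        match p, this with
        | [a, b], _ => exact ⟨a, b, rfl⟩
      have hab : -(n + 1) ≤ max a b ∧ max a b ≤ n := by
        have h := (hps [a, b] (by simp)).2
        simpa [pvPMax] using h
      have hm : ((n + 1).toNat : Int) = n + 1 := by omega
      have hj1 : -(((n + 1).toNat : Nat) : Int) ≤ max a b := by omega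
      have hj2 : max a b < (((n + 1).toNat : Nat) : Int) := by omega
      set jn := if 0 ≤ max a b then (max a b).toNat else (max a b + ((n + 1).toNat : Int)).toNat with hjn
      have hjn_lt : jn < (n + 1).toNat := by
        rw [hjn]; split_ifs <;> omega
      have hstep : pvBucketStep acc [a, b] =
          acc.set jn ((PySem.List.pyGetD acc (max a b) []) ++ [min a b]) := by
        show PySem.List.pySetD acc (max a b) _ = _
        rw [pvSetD_wrap acc (max a b) _ (n + 1).toNat hlen hj1 hj2, ← hjn]
      have hlen' : (pvBucketStep acc [a, b]).length = (n + 1).toNat := by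
        rw [hstep, List.length_set, hlen]
      rw [List.foldl_cons, ih _ hlen' (fun q hq => hps q (by simp [hq]))]
      rw [hstep]
      have hgetr : ∀ (xs : List (List Int)), xs.length = (n + 1).toNat →
          PySem.List.pyGetD xs r [] = xs.getD r.toNat [] := by
        intro xs hxs
        rw [pvGetD_wrap xs r [] (n + 1).toNat hxs (by omega) (by omega), if_pos h0]
      have hget : PySem.List.pyGetD acc (max a b) [] = acc.getD jn [] := by
        rw [pvGetD_wrap acc (max a b) [] (n + 1).toNat hlen hj1 hj2, ← hjn]
      have hidx : pvIdx n [a, b] = r ↔ jn = r.toNat := by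
        rw [pvIdx, hjn]
        simp only [pvPMax]
        split_ifs <;> omega
      rw [hgetr _ (by rw [List.length_set, hlen]), hgetr _ hlen]
      by_cases hc : pvIdx n [a, b] = r
      · have hje : jn = r.toNat := hidx.mp hc
        rw [← hje, hget]
        have hsv : (acc.set jn (acc.getD jn [] ++ [min a b])).getD jn [] =
            acc.getD jn [] ++ [min a b] := by
          simp [List.getD, List.getElem?_set, hlen ▸ hjn_lt]
        rw [hsv]
        have e : decide (pvIdx n [a, b] = r) = true := decide_eq_true hc
        simp only [List.filter_cons, e, if_true, List.map_cons, pvPMin, List.append_assoc,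
          List.cons_append, List.nil_append]
      · have hje : jn ≠ r.toNat := fun h => hc (hidx.mpr h)
        have hsv : (acc.set jn (acc.getD jn [] ++ [min a b])).getD r.toNat [] =
            acc.getD r.toNat [] := by
          simp [List.getD, List.getElem?_set, hje]
        rw [hget, hsv]
        have e : decide (pvIdx n [a, b] = r) = false := decide_eq_false hc
        simp [List.filter_cons, e]

theorem pvPMin_le_pvPMax (p : List Int) (h : p.length = 2) : pvPMin p ≤ pvPMax p := by
  match p, h with
  | [a, b], _ => simp only [pvPMin, pvPMax]; omega

theorem pvFoldPos (ls : List Int) (t : Int × Int) (h1 : t.2 ≤ t.1) (h2 : 0 ≤ t.2) :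
    ls.foldl pvTop2Step t = (ls.filter (fun l => decide (0 < l))).foldl pvTop2Step t := by
  induction ls generalizing t with
  | nil => rfl
  | cons l ls ih =>
      obtain ⟨p, q⟩ := t
      simp only at h1 h2
      rw [List.foldl_cons, List.filter_cons]
      by_cases hl : 0 < l
      · rw [if_pos (by simpa using hl), List.foldl_cons]
        have hinv : (pvTop2Step (p, q) l).2 ≤ (pvTop2Step (p, q) l).1 ∧
            0 ≤ (pvTop2Step (p, q) l).2 := by
          unfold pvTop2Step
          split_ifs <;> constructor <;> dsimp only <;> omega
        exact ih _ hinv.1 hinv.2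
      · have hno : pvTop2Step (p, q) l = (p, q) := by
          unfold pvTop2Step
          rw [if_neg (by dsimp only; omega), if_neg (by dsimp only; omega)]
        rw [hno, if_neg (by simpa using hl)]
        exact ih _ h1 h2

theorem pvF_pos (ls : List Int) : pvF ls = pvF (ls.filter (fun l => decide (0 < l))) := by
  unfold pvF
  exact pvFoldPos ls (0, 0) le_rfl le_rfl

theorem pvBucketFilter (n r : Int) (ps : List (List Int)) (hr : 1 ≤ r)
    (hps : ∀ p ∈ ps, p.length = 2) :
    ((ps.filter (fun p => decide (pvIdx n p = r))).map pvPMin).filter (fun l => decide (0 < l)) =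
      ((ps.filter (fun p => decide (pvPMax p = r))).map pvPMin).filter (fun l => decide (0 < l)) := by
  induction ps with
  | nil => rfl
  | cons p t ih =>
      have ih' := ih (fun q hq => hps q (by simp [hq]))
      have hmm := pvPMin_le_pvPMax p (hps p (by simp))
      by_cases hpos : 0 ≤ pvPMax p
      · have hi : pvIdx n p = pvPMax p := if_pos hpos
        by_cases hc : pvPMax p = r
        · have e1 : decide (pvIdx n p = r) = true := decide_eq_true (by rw [hi]; exact hc)
          have e2 : decide (pvPMax p = r) = true := decide_eq_true hc
          simp [List.filter_cons, e1, e2, ih', Bool.false_eq_true, reduceIte]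
        · have e1 : decide (pvIdx n p = r) = false := decide_eq_false (by rw [hi]; exact hc)
          have e2 : decide (pvPMax p = r) = false := decide_eq_false hc
          simp [List.filter_cons, e1, e2, ih', Bool.false_eq_true, reduceIte]
      · have e2 : decide (pvPMax p = r) = false := decide_eq_false (by omega)
        have e3 : decide (0 < pvPMin p) = false := decide_eq_false (by omega)
        by_cases hc : pvIdx n p = r
        · have e1 : decide (pvIdx n p = r) = true := decide_eq_true hc
          simp [List.filter_cons, e1, e2, e3, ih', Bool.false_eq_true, reduceIte]
        · have e1 : decide (pvIdx n p = r) = false := decide_eq_false hc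
          simp only [List.filter_cons, e1, e2]
          split_ifs <;> simp_all

theorem pvPosMins_zero (ps : List (List Int))
    (hps : ∀ p ∈ ps, p.length = 2) :
    (pvMins ps 0).filter (fun l => decide (0 < l)) = [] := by
  apply List.filter_eq_nil_iff.mpr
  intro l hl
  simp only [pvMins, List.mem_map] at hl
  obtain ⟨p, hp, rfl⟩ := hl
  have hp1 := List.mem_filter.mp hp
  have := pvPMin_le_pvPMax p (hps p hp1.1)
  have h0 : pvPMax p ≤ 0 := by simpa using hp1.2
  simp only [decide_eq_true_eq]
  omega

theorem pvMins_split (ps : List (List Int)) (r : Int)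
    (hps : ∀ p ∈ ps, p.length = 2) :
    (pvMins ps r ++ (ps.filter (fun p => decide (pvPMax p = r + 1))).map pvPMin).Perm
      (pvMins ps (r + 1)) := by
  induction ps with
  | nil => rfl
  | cons p t ih =>
      have ih' := ih (fun q hq => hps q (by simp [hq]))
      by_cases h1 : pvPMax p ≤ r
      · have e1 : decide (pvPMax p ≤ r) = true := decide_eq_true h1
        have e2 : decide (pvPMax p = r + 1) = false := decide_eq_false (by omega)
        have e3 : decide (pvPMax p ≤ r + 1) = true := decide_eq_true (by omega)
        simp only [pvMins, List.filter_cons, e1, e2, e3, if_true, if_false,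
          List.map_cons, List.cons_append]
        exact ih'.cons _
      · by_cases h2 : pvPMax p = r + 1
        · have e1 : decide (pvPMax p ≤ r) = false := decide_eq_false h1
          have e2 : decide (pvPMax p = r + 1) = true := decide_eq_true h2
          have e3 : decide (pvPMax p ≤ r + 1) = true := decide_eq_true (by omega)
          simp only [pvMins, List.filter_cons, e1, e2, e3, if_true, if_false, List.map_cons]
          exact (List.perm_middle).trans (ih'.cons _)
        · have e1 : decide (pvPMax p ≤ r) = false := decide_eq_false h1
          have e2 : decide (pvPMax p = r + 1) = false := decide_eq_false h2
          have e3 : decide (pvPMax p ≤ r + 1) = false := decide_eq_false (by omega)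
          simp only [pvMins, List.filter_cons, e1, e2, e3, if_true, if_false]
          exact ih'

theorem pvGetD_replicate_nil (m : Nat) (r : Int) :
    PySem.List.pyGetD (List.replicate m ([] : List Int)) r [] = [] := by
  simp only [PySem.List.pyGetD, PySem.List.pyGet?, PySem.List.pyIdx?]
  split_ifs <;> simp [List.getElem?_replicate] <;> split_ifs <;> rfl

theorem pvMain (n : Int) (ps : List (List Int)) (hn : 0 ≤ n)
    (hps : ∀ p ∈ ps, p.length = 2 ∧ -(n + 1) ≤ pvPMax p ∧ pvPMax p ≤ n)
    (k : Nat) (hk : (k : Int) ≤ n) :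
    (PySem.List.pyRange 1 (1 + (k : Int)) 1).foldl
        (pvAStep (ps.foldl pvBucketStep (List.replicate (n + 1).toNat [])))
        (0, 0, 0, List.replicate (n + 1).toNat (0 : Int)) =
      (((PySem.List.pyRange 1 (1 + (k : Int)) 1).foldl (pvBStep ps)
          (0, List.replicate (n + 1).toNat (0 : Int))).1,
       (pvF (pvMins ps (k : Int))).1, (pvF (pvMins ps (k : Int))).2,
       ((PySem.List.pyRange 1 (1 + (k : Int)) 1).foldl (pvBStep ps)
          (0, List.replicate (n + 1).toNat (0 : Int))).2) := by
  have hlen2 : ∀ p ∈ ps, p.length = 2 := fun p hp => (hps p hp).1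
  induction k with
  | zero =>
      simp only [Nat.cast_zero]
      rw [PySem.List.pyRange_one_eq_nil (by omega)]
      have hF0 : pvF (pvMins ps 0) = (0, 0) := by
        rw [pvF_pos, pvPosMins_zero ps hlen2]
        rfl
      simp [List.foldl_nil, hF0]
  | succ k ih =>
      have hk' : (k : Int) ≤ n := by push_cast at hk ⊢; omega
      have hcast : (((k : Nat) + 1 : Nat) : Int) = (k : Int) + 1 := by push_cast; ring
      rw [hcast]
      have hsplit : PySem.List.pyRange 1 (1 + ((k : Int) + 1)) 1 =
          PySem.List.pyRange 1 (1 + (k : Int)) 1 ++ [1 + (k : Int)] := by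
        rw [show (1 + ((k : Int) + 1)) = (1 + (k : Int)) + 1 from by ring]
        exact PySem.List.pyRange_one_succ_right (by omega)
      rw [hsplit, List.foldl_append, List.foldl_append, ih hk']
      rw [List.foldl_cons, List.foldl_nil, List.foldl_cons, List.foldl_nil]
      -- the bucket at r = 1 + k
      have hbucket : PySem.List.pyGetD
          (ps.foldl pvBucketStep (List.replicate (n + 1).toNat [])) (1 + (k : Int)) [] =
          (ps.filter (fun p => decide (pvIdx n p = (k : Int) + 1))).map pvPMin := by
        rw [pvBucket_go n (1 + (k : Int)) ps _ (by simp) hn (by omega) (by omega) hps]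
        rw [pvGetD_replicate_nil]
        rw [show (1 + (k : Int)) = (k : Int) + 1 from by ring]
        simp
      -- A's inner top-two fold equals the top-two of the filtered mins
      have hF : ((ps.filter (fun p => decide (pvIdx n p = (k : Int) + 1))).map pvPMin).foldl
          pvTop2Step ((pvF (pvMins ps (k : Int))).1, (pvF (pvMins ps (k : Int))).2) =
          pvF (pvMins ps ((k : Int) + 1)) := by
        rw [Prod.mk.eta]
        rw [show (pvF (pvMins ps (k : Int))) = (pvMins ps (k : Int)).foldl pvTop2Step (0, 0) from rfl]
        rw [← List.foldl_append]
        rw [show ∀ ls : List Int, ls.foldl pvTop2Step (0, 0) = pvF ls from fun _ => rfl]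
        rw [pvF_pos, List.filter_append,
          pvBucketFilter n ((k : Int) + 1) ps (by omega) hlen2,
          ← List.filter_append, ← pvF_pos]
        exact pvF_perm (pvMins_split ps (k : Int) hlen2)
      -- B's sorted head pair
      have hB := pvB_top2 ps ((k : Int) + 1) hlen2
      have hB1 : PySem.List.pyGetD
          (PySem.List.sorted ([0, 0] ++ pvAltMins ps ((k : Int) + 1)) (fun x => x) true) 0 0 =
          (pvF (pvMins ps ((k : Int) + 1))).1 := congrArg Prod.fst hB
      have hB2 : PySem.List.pyGetD
          (PySem.List.sorted ([0, 0] ++ pvAltMins ps ((k : Int) + 1)) (fun x => x) true) 1 0 =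
          (pvF (pvMins ps ((k : Int) + 1))).2 := congrArg Prod.snd hB
      show (pvAStep _ _ _) = _
      unfold pvAStep pvBStep
      simp only []
      rw [hbucket, hF]
      rw [show (1 + (k : Int)) = (k : Int) + 1 from by ring]
      rw [hB1, hB2]

theorem pvFinal (n : Int) (ps : List (List Int)) (hn : 0 ≤ n)
    (hps : ∀ p ∈ ps, p.length = 2 ∧ -(n + 1) ≤ pvPMax p ∧ pvPMax p ≤ n) :
    maxSubarrays n ps = maxSubarrays_alt n ps := by
  unfold maxSubarrays maxSubarrays_alt
  dsimp only
  have hcast : n + 1 = 1 + ((n.toNat : Nat) : Int) := by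
    rw [Int.toNat_of_nonneg hn]; ring
  rw [show PySem.List.pyRange 1 (n + 1) 1 = PySem.List.pyRange 1 (1 + ((n.toNat : Nat) : Int)) 1
    from by rw [hcast]]
  rw [pvMain n ps hn hps n.toNat (by rw [Int.toNat_of_nonneg hn])]

-- ===== VERDICT (by name: the statement is the Claim_ definition above) =====
theorem maxSubarrays_spec : Claim_equal_maxSubarrays := by
  intro n ps _ hpre
  exact pvFinal n ps hpre.1 hpre.2
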